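-- pv_equiv track=rewrite | github.com/pypi-data/pypi-mirror-376 | packages/mmap-ninja-dataframe/mmap_ninja_dataframe-0.4.4-py3-none-any.whl/mmap_ninja_dataframe/sparse.py | _extract_positions_and_task_values
-- ===== SOURCE A (Python) =====
-- from collections import defaultdict
--
-- def _find_sample_positions_and_values(all_keys, sample, task_values, lens_dict):
--     sample_positions = []
--     values_dict = {}
--     for key in all_keys:
--         value = sample.get(key)
--         if value is None:
--             continue
--         idx_task = len(task_values[key]) + lens_dict[key]
--         sample_positions.append((idx_task, key))
--         values_dict[key] = value
--     return sample_positions, values_dict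
--
-- def _extract_positions_and_task_values(all_keys, dicts, lens_dict):
--     task_values = defaultdict(list)
--     positions = []
--     for i, dct in enumerate(dicts):
--         sample_positions, values_dict = _find_sample_positions_and_values(
--             all_keys, dct, task_values, lens_dict
--         )
--         for k, v in values_dict.items():
--             task_values[k].append(v)
--         positions.append(sample_positions)
--     return positions, dict(task_values)
-- ===== SOURCE B (Python) =====
-- def _extract_positions_and_task_values(all_keys, dicts, lens_dict):
--     rank = {k: r for r, k in enumerate(all_keys)}
--     task_values = {}
--     positions = []
--     for dct in dicts:
--         pos = []
--         for k in sorted((k for k in dct if k in rank), key=rank.__getitem__):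
--             bucket = task_values.setdefault(k, [])
--             pos.append((len(bucket) + lens_dict[k], k))
--             bucket.append(dct[k])
--         positions.append(pos)
--     return positions, task_values
-- ===== Notes on version B (the rewrite author's own statement) =====
-- stated objective: faster
-- what changed: A scans the whole all_keys list once per dict; B precomputes a key->rank map once and per dict scans only the dict's own keys, sorting them by rank, so per-dict work no longer depends on len(all_keys). Pre_ excludes inputs where a key occurring more than once in all_keys is present in some dict, on which A's repetition of the same position tuple once per occurrence is accidental, and inputs where a listed key present in some dict is missing from lens_dict (KeyError).
import Mathlib
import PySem

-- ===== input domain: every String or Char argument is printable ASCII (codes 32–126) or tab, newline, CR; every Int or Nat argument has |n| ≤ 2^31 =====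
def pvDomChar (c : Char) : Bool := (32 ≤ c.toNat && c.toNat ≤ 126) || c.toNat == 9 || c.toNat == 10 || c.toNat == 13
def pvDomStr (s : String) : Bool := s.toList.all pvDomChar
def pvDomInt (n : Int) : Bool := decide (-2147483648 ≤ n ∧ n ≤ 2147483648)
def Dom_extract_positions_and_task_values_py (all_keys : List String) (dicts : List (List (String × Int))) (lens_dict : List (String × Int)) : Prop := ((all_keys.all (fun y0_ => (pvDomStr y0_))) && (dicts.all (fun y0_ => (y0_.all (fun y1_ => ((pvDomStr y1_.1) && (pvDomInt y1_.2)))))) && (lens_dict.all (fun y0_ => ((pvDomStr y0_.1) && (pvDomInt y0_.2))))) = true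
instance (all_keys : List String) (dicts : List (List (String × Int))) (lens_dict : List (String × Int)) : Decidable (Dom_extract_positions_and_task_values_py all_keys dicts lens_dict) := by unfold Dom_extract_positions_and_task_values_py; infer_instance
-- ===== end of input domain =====

-- B replaces A's scan of all of all_keys for every dict by a one-time key → rank map and a
-- per-dict scan of the dict's own keys sorted by rank (objective: faster; same return value
-- on Pre_: all_keys without duplicate entries and no missing lens_dict key).

-- ===== PORT A =====
-- helper _find_sample_positions_and_values; `task_values[key]` on the defaultdict is read as
-- getD key [] (the entry it would create is always filled by the caller right after, with the
-- same final item order, so the returned value is identical).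
def pvFindA (all_keys : List String) (sample : PySem.Dict String Int)
    (tv : PySem.Dict String (List Int)) (lens : PySem.Dict String Int) :
    List (Int × String) × PySem.Dict String Int :=
  all_keys.foldl (fun acc key =>
    match sample.get? key with
    | none => acc
    | some value =>
        (acc.1 ++ [(((tv.getD key []).length : Int) + lens.getD key 0, key)],
         acc.2.insert key value))
    ([], PySem.Dict.empty)

-- one iteration of A's `for i, dct in enumerate(dicts)` loop (state: task_values, positions)
def pvStepA (all_keys : List String) (lens : PySem.Dict String Int)
    (st : PySem.Dict String (List Int) × List (List (Int × String)))
    (dct : List (String × Int)) :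
    PySem.Dict String (List Int) × List (List (Int × String)) :=
  let res := pvFindA all_keys (PySem.Dict.ofList dct) st.1 lens
  (res.2.items.foldl (fun tv kv => tv.insert kv.1 (tv.getD kv.1 [] ++ [kv.2])) st.1,
   st.2 ++ [res.1])

-- `lens_dict[key]` is ported as getD (a missing key is a KeyError: excluded by Pre_ below)
def extract_positions_and_task_values_py (all_keys : List String)
    (dicts : List (List (String × Int))) (lens_dict : List (String × Int)) :
    (List (List (Int × String))) × (List (String × List Int)) :=
  let lens := PySem.Dict.ofList lens_dict
  let st := dicts.foldl (pvStepA all_keys lens) (PySem.Dict.empty, [])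
  (st.2, st.1.items)

-- ===== PORT B =====
-- rank = {k: r for r, k in enumerate(all_keys)}
def pvRank (all_keys : List String) : PySem.Dict String Int :=
  (PySem.List.enumerate all_keys 0).foldl (fun d p => d.insert p.2 p.1) PySem.Dict.empty

-- one iteration of B's `for dct in dicts` loop (state: positions, task_values);
-- setdefault + in-place append is insert k (bucket ++ [dct[k]]) (same entry position).
def pvStepB (rank : PySem.Dict String Int) (lens : PySem.Dict String Int)
    (st : List (List (Int × String)) × PySem.Dict String (List Int))
    (dct : List (String × Int)) :
    List (List (Int × String)) × PySem.Dict String (List Int) :=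
  let sample := PySem.Dict.ofList dct
  let ks := PySem.List.sorted (sample.keys.filter (fun k => rank.contains k))
    (fun k => rank.getD k 0) false
  let inner := ks.foldl
    (fun (s : PySem.Dict String (List Int) × List (Int × String)) k =>
      let bucket := s.1.getD k []
      (s.1.insert k (bucket ++ [sample.getD k 0]),
       s.2 ++ [((bucket.length : Int) + lens.getD k 0, k)]))
    (st.2, [])
  (st.1 ++ [inner.2], inner.1)

def extract_positions_and_task_values_py_alt (all_keys : List String)
    (dicts : List (List (String × Int))) (lens_dict : List (String × Int)) :
    (List (List (Int × String))) × (List (String × List Int)) :=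
  let rank := pvRank all_keys
  let lens := PySem.Dict.ofList lens_dict
  let st := dicts.foldl (pvStepB rank lens) ([], PySem.Dict.empty)
  (st.1, st.2.items)

-- ===== PRECONDITION & SPEC =====
-- Pre_ excludes (a) inputs where a key occurring MORE THAN ONCE in all_keys is present in some
-- dict — there A emits the same position tuple once per occurrence of the key, an accidental
-- corner of its all_keys scan — and (b) the inputs where Python A raises KeyError: a key listed
-- in all_keys and present in some dict but missing from lens_dict (B raises there too).
def Pre_extract_positions_and_task_values_py (all_keys : List String) (dicts : List (List (String × Int))) (lens_dict : List (String × Int)) : Prop :=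
  (all_keys.all (fun k => decide (all_keys.count k ≤ 1)
    || dicts.all (fun dct => !(dct.any (fun p => p.1 == k))))) = true ∧
  (dicts.all (fun dct => all_keys.all (fun k =>
    !(dct.any (fun p => p.1 == k)) || lens_dict.any (fun p => p.1 == k)))) = true
instance (all_keys : List String) (dicts : List (List (String × Int))) (lens_dict : List (String × Int)) : Decidable (Pre_extract_positions_and_task_values_py all_keys dicts lens_dict) := by unfold Pre_extract_positions_and_task_values_py; infer_instance
def pvWitness_extract_positions_and_task_values_py : List String × (List (List (String × Int))) × (List (String × Int)) :=
  (["a", "b"], [[("a", 1)], [("b", 2), ("a", 3)]], [("a", 0), ("b", 5)])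

def Spec_extract_positions_and_task_values_py (all_keys : List String) (dicts : List (List (String × Int))) (lens_dict : List (String × Int)) (out : (List (List (Int × String))) × (List (String × List Int))) : Prop := out = extract_positions_and_task_values_py_alt all_keys dicts lens_dict
instance (all_keys : List String) (dicts : List (List (String × Int))) (lens_dict : List (String × Int)) (out : (List (List (Int × String))) × (List (String × List Int))) : Decidable (Spec_extract_positions_and_task_values_py all_keys dicts lens_dict out) := by unfold Spec_extract_positions_and_task_values_py; infer_instance

-- ===== CLAIM =====
def Claim_equal_extract_positions_and_task_values_py : Prop := ∀ (all_keys : List String) (dicts : List (List (String × Int))) (lens_dict : List (String × Int)), Dom_extract_positions_and_task_values_py all_keys dicts lens_dict → Pre_extract_positions_and_task_values_py all_keys dicts lens_dict → Spec_extract_positions_and_task_values_py all_keys dicts lens_dict (extract_positions_and_task_values_py all_keys dicts lens_dict)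

-- ===== LEMMAS AND PROOFS =====

-- the rank fold does not touch keys outside the enumerated list
lemma rankFold_getD_not_mem (xs : List String) (s : Int) (d : PySem.Dict String Int)
    (k : String) (hk : k ∉ xs) :
    ((PySem.List.enumerate xs s).foldl (fun d p => d.insert p.2 p.1) d).getD k 0
      = d.getD k 0 := by
  induction xs generalizing s d with
  | nil => rfl
  | cons x xs ih =>
      rw [PySem.List.enumerate_cons, List.foldl_cons]
      rw [ih (s + 1) _ (fun h => hk (List.mem_cons_of_mem _ h))]
      exact PySem.Dict.getD_insert_of_ne _ _ _ (fun h => hk (h ▸ List.mem_cons_self))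

-- for a key occurring exactly once, rank[k] is k's index
lemma pvRank_getD_once (xs : List String) (s : Int)
    (d : PySem.Dict String Int) (r : Int) (k : String)
    (hm : (r, k) ∈ PySem.List.enumerate xs s) (h1 : xs.count k = 1) :
    ((PySem.List.enumerate xs s).foldl (fun d p => d.insert p.2 p.1) d).getD k 0 = r := by
  induction xs generalizing s d with
  | nil => simp [PySem.List.enumerate_nil] at hm
  | cons x xs ih =>
      rw [PySem.List.enumerate_cons] at hm ⊢
      rw [List.foldl_cons]
      rcases List.mem_cons.mp hm with heq | htail
      · cases heq
        have hk0 : xs.count k = 0 := by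
          simp [List.count_cons_self] at h1
          omega
        rw [rankFold_getD_not_mem xs (r + 1) _ k (List.count_eq_zero.mp hk0)]
        exact PySem.Dict.getD_insert_self _ _ _ _
      · have hkxs : k ∈ xs := by
          have : ((r, k)).2 ∈ (PySem.List.enumerate xs (s + 1)).map (·.2) :=
            List.mem_map_of_mem htail
          rwa [PySem.List.map_snd_enumerate] at this
        have hne : k ≠ x := by
          intro h
          subst h
          have hpos := List.count_pos_iff.mpr hkxs
          simp [List.count_cons_self] at h1
          omega
        have h1' : xs.count k = 1 := by
          rw [List.count_cons] at h1
          simpa [Ne.symm hne] using h1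
        exact ih (s + 1) _ htail h1'

-- contains on a dict literal is a key scan
lemma contains_ofList_any (dct : List (String × Int)) (k : String) :
    (PySem.Dict.ofList dct).contains k = dct.any (fun p => p.1 == k) := by
  apply Bool.eq_iff_iff.mpr
  rw [PySem.Dict.contains_iff_mem_keys]
  show k ∈ (dct.foldl (fun acc p => acc.insert p.1 p.2) PySem.Dict.empty).keys ↔ _
  rw [PySem.Dict.keys_foldl_insert_key dct (fun p => p.1) (fun _ p => p.2),
    PySem.Dict.keys_empty, PySem.Set.update_nil_left, PySem.Set.mem_ofList, List.mem_map,
    List.any_eq_true]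
  constructor
  · rintro ⟨p, hp, rfl⟩; exact ⟨p, hp, by simp⟩
  · rintro ⟨p, hp, hb⟩; exact ⟨p, hp, by simpa using hb⟩

-- a filter whose predicate only accepts keys occurring once is duplicate-free
lemma filter_nodup_of_once (all_keys : List String) (c : String → Bool)
    (H : ∀ k, c k = true → k ∈ all_keys → all_keys.count k = 1) :
    (all_keys.filter c).Nodup := by
  apply List.nodup_iff_count.mpr
  intro a
  by_cases ha : a ∈ all_keys.filter c
  · rcases List.mem_filter.mp ha with ⟨haK, hac⟩
    calc (all_keys.filter c).count a ≤ all_keys.count a := (List.filter_sublist).count_le a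
      _ = 1 := H a hac haK
  · rw [List.count_eq_zero_of_not_mem ha]
    omega

lemma pvRank_contains (all_keys : List String) (k : String) :
    (pvRank all_keys).contains k = true ↔ k ∈ all_keys := by
  rw [PySem.Dict.contains_iff_mem_keys]
  unfold pvRank
  rw [PySem.Dict.keys_foldl_insert_key (PySem.List.enumerate all_keys 0) (fun p => p.2)
    (fun _ p => p.1)]
  rw [PySem.Dict.keys_empty, PySem.Set.update_nil_left, PySem.Set.mem_ofList,
    PySem.List.map_snd_enumerate]

-- B's sorted key list for one dict is all_keys filtered to the dict's keys
lemma order_eq (all_keys : List String) (dct : List (String × Int))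
    (Hk : ∀ k, (PySem.Dict.ofList dct).contains k = true → k ∈ all_keys →
      all_keys.count k = 1) :
    PySem.List.sorted
      (((PySem.Dict.ofList dct).keys.filter (fun k => (pvRank all_keys).contains k)))
      (fun k => (pvRank all_keys).getD k 0) false
    = all_keys.filter (fun k => (PySem.Dict.ofList dct).contains k) := by
  set sample := PySem.Dict.ofList dct with hs
  set S := sample.keys.filter (fun k => (pvRank all_keys).contains k) with hS
  set P := all_keys.filter (fun k => sample.contains k) with hP
  have hP_nd : P.Nodup := filter_nodup_of_once all_keys _ Hk
  have hS_nd : S.Nodup := (PySem.Dict.nodup_keys_ofList dct).filter _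
  have hmem : ∀ k, k ∈ P ↔ k ∈ S := by
    intro k
    rw [hP, hS, List.mem_filter, List.mem_filter, ← PySem.Dict.contains_iff_mem_keys,
      pvRank_contains]
    tauto
  have hpw : P.Pairwise (fun a b => (pvRank all_keys).getD a 0 < (pvRank all_keys).getD b 0) := by
    refine List.pairwise_filter.mpr ?_
    rw [List.pairwise_iff_getElem]
    intro i j hi hj hij hci hcj
    have h1 : (pvRank all_keys).getD all_keys[i] 0 = (i : Int) := by
      apply pvRank_getD_once all_keys 0 PySem.Dict.empty
      · rcases PySem.List.mem_enumerate_iff all_keys 0 ((i : Int), all_keys[i]) with ⟨_, hb⟩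
        exact hb ⟨i, hi, by simp⟩
      · exact Hk _ hci (List.getElem_mem hi)
    have h2 : (pvRank all_keys).getD all_keys[j] 0 = (j : Int) := by
      apply pvRank_getD_once all_keys 0 PySem.Dict.empty
      · rcases PySem.List.mem_enumerate_iff all_keys 0 ((j : Int), all_keys[j]) with ⟨_, hb⟩
        exact hb ⟨j, hj, by simp⟩
      · exact Hk _ hcj (List.getElem_mem hj)
    rw [h1, h2]
    exact_mod_cast hij
  exact PySem.List.sorted_eq_of_perm_of_pairwise_lt S P _
    ((List.perm_ext_iff_of_nodup hP_nd hS_nd).mpr hmem) hpw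

-- A's helper, split into its two components
lemma pvFindA_eq (all_keys : List String) (sample : PySem.Dict String Int)
    (tv : PySem.Dict String (List Int)) (lens : PySem.Dict String Int) :
    pvFindA all_keys sample tv lens
      = ((all_keys.filter (fun k => sample.contains k)).map
           (fun k => (((tv.getD k []).length : Int) + lens.getD k 0, k)),
         (all_keys.filter (fun k => sample.contains k)).foldl
           (fun d k => d.insert k (sample.getD k 0)) PySem.Dict.empty) := by
  unfold pvFindA
  rw [PySem.List.foldl_congr_mem all_keys _
    (fun acc key =>
      (if sample.contains key then
         acc.1 ++ [(((tv.getD key []).length : Int) + lens.getD key 0, key)] else acc.1,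
       if sample.contains key then acc.2.insert key (sample.getD key 0) else acc.2))
    ([], PySem.Dict.empty) ?_]
  · rw [PySem.List.foldl_prod_mk
      (f := fun a key => if sample.contains key then
        a ++ [(((tv.getD key []).length : Int) + lens.getD key 0, key)] else a)
      (g := fun (d : PySem.Dict String Int) key => if sample.contains key then d.insert key (sample.getD key 0) else d)]
    rw [PySem.List.foldl_append_if, PySem.List.foldl_if_eq_foldl_filter, List.nil_append]
  · intro acc key _
    cases hcase : sample.get? key with
    | none =>
        have hc : sample.contains key = false := by
          rw [PySem.Dict.contains_eq_isSome_get?, hcase]; rfl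
        simp [hc]
    | some v =>
        have hc : sample.contains key = true := by
          rw [PySem.Dict.contains_eq_isSome_get?, hcase]; rfl
        have hg := PySem.Dict.getD_of_get?_eq_some sample 0 hcase
        simp [hc, hg]

-- a fold of inserts whose value depends only on the key: items are the deduped keys with values
lemma items_foldl_insert_fun {κ ν : Type} [BEq κ] [LawfulBEq κ] (v : κ → ν) (l : List κ) :
    ((l.foldl (fun d k => d.insert k (v k)) PySem.Dict.empty).items : List (κ × ν))
      = (PySem.List.dedup l).map (fun k => (k, v k)) := by
  induction l using List.reverseRecOn with
  | nil => rfl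
  | append_singleton l x ih =>
      rw [List.foldl_append, List.foldl_cons, List.foldl_nil,
        PySem.List.dedup_eq_ofList, PySem.Set.ofList_append_singleton]
      have hkeys : (l.foldl (fun d k => d.insert k (v k)) PySem.Dict.empty).keys
          = PySem.Set.ofList l := by
        rw [PySem.Dict.keys_foldl_insert l (fun _ k => v k), PySem.Dict.keys_empty,
          PySem.Set.update_nil_left]
      by_cases hx : x ∈ l
      · have hmem : x ∈ PySem.Set.ofList l := (PySem.Set.mem_ofList l x).mpr hx
        have hc : (l.foldl (fun d k => d.insert k (v k)) PySem.Dict.empty).contains x = true := by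
          rw [PySem.Dict.contains_iff_mem_keys, hkeys]; exact hmem
        rw [PySem.Dict.items_insert_of_contains _ _ hc, ih, PySem.Set.add_of_mem hmem,
          PySem.List.dedup_eq_ofList, List.map_map]
        apply List.map_congr_left
        intro a _
        by_cases hax : a = x <;> simp [hax]
      · have hmem : x ∉ PySem.Set.ofList l := fun h => hx ((PySem.Set.mem_ofList l x).mp h)
        have hc : (l.foldl (fun d k => d.insert k (v k)) PySem.Dict.empty).contains x = false := by
          rw [← Bool.not_eq_true, PySem.Dict.contains_iff_mem_keys, hkeys]; exact hmem
        rw [PySem.Dict.items_insert_of_not_contains _ _ hc, ih, PySem.Set.add_of_not_mem hmem,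
          PySem.List.dedup_eq_ofList, List.map_append]
        rfl

-- B's interleaved per-dict fold over a duplicate-free key list, split into its two components
lemma loopB_eq (sample : PySem.Dict String Int) (lens : PySem.Dict String Int)
    (l : List String) (hl : l.Nodup) (tv : PySem.Dict String (List Int))
    (pos : List (Int × String)) :
    l.foldl
      (fun (s : PySem.Dict String (List Int) × List (Int × String)) k =>
        (s.1.insert k (s.1.getD k [] ++ [sample.getD k 0]),
         s.2 ++ [(((s.1.getD k []).length : Int) + lens.getD k 0, k)]))
      (tv, pos)
    = (l.foldl (fun d k => d.insert k (d.getD k [] ++ [sample.getD k 0])) tv,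
       pos ++ l.map (fun k => (((tv.getD k []).length : Int) + lens.getD k 0, k))) := by
  induction l generalizing tv pos with
  | nil => simp
  | cons x l ih =>
      rw [List.foldl_cons, List.foldl_cons, List.map_cons]
      rw [ih (List.nodup_cons.mp hl).2]
      have hmap : l.map (fun k =>
          ((((tv.insert x (tv.getD x [] ++ [sample.getD x 0])).getD k []).length : Int)
            + lens.getD k 0, k))
          = l.map (fun k => (((tv.getD k []).length : Int) + lens.getD k 0, k)) := by
        apply List.map_congr_left
        intro k hk
        have hne : k ≠ x := fun h => (List.nodup_cons.mp hl).1 (h ▸ hk)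
        rw [PySem.Dict.getD_insert_of_ne _ _ _ hne]
      simp [hmap, List.append_assoc]

-- one step of A's loop equals one step of B's loop (states swapped)
lemma step_eq (all_keys : List String)
    (lens : PySem.Dict String Int) (dct : List (String × Int))
    (Hk : ∀ k, (PySem.Dict.ofList dct).contains k = true → k ∈ all_keys →
      all_keys.count k = 1)
    (tv : PySem.Dict String (List Int)) (pos : List (List (Int × String))) :
    pvStepA all_keys lens (tv, pos) dct
      = ((pvStepB (pvRank all_keys) lens (pos, tv) dct).2,
         (pvStepB (pvRank all_keys) lens (pos, tv) dct).1) := by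
  simp only [pvStepA, pvStepB, pvFindA_eq, order_eq all_keys dct Hk]
  set sample := PySem.Dict.ofList dct with hs
  set c : String → Bool := fun k => sample.contains k with hc
  have hfc : (all_keys.filter c).Nodup := filter_nodup_of_once all_keys _ Hk
  rw [loopB_eq sample lens (all_keys.filter c) hfc tv []]
  refine Prod.ext ?_ rfl
  show List.foldl _ tv (List.foldl (fun d k => d.insert k (sample.getD k 0))
      PySem.Dict.empty (all_keys.filter c)).items = _
  rw [items_foldl_insert_fun (fun k => sample.getD k 0) (all_keys.filter c),
    PySem.List.dedup_eq_ofList, PySem.Set.ofList_eq_self_of_nodup _ hfc,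
    List.foldl_map]

lemma fold_eq (all_keys : List String)
    (lens : PySem.Dict String Int) (dicts : List (List (String × Int)))
    (HD : ∀ dct ∈ dicts, ∀ k, (PySem.Dict.ofList dct).contains k = true →
      k ∈ all_keys → all_keys.count k = 1)
    (tv : PySem.Dict String (List Int)) (pos : List (List (Int × String))) :
    dicts.foldl (pvStepA all_keys lens) (tv, pos)
      = ((dicts.foldl (pvStepB (pvRank all_keys) lens) (pos, tv)).2,
         (dicts.foldl (pvStepB (pvRank all_keys) lens) (pos, tv)).1) := by
  induction dicts generalizing tv pos with
  | nil => rfl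
  | cons d ds ih =>
      rw [List.foldl_cons, List.foldl_cons,
        step_eq all_keys lens d (HD d List.mem_cons_self) tv pos]
      exact ih (fun dct hdct => HD dct (List.mem_cons_of_mem _ hdct)) _ _

-- ===== VERDICT =====
theorem extract_positions_and_task_values_py_spec : Claim_equal_extract_positions_and_task_values_py := by
  intro all_keys dicts lens_dict _ hpre
  have HD : ∀ dct ∈ dicts, ∀ k, (PySem.Dict.ofList dct).contains k = true →
      k ∈ all_keys → all_keys.count k = 1 := by
    intro dct hdct k hc hk
    have h := (List.all_eq_true.mp hpre.1) k hk
    rcases Bool.or_eq_true_iff.mp h with h1 | h2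
    · have hle := of_decide_eq_true h1
      have hpos := List.count_pos_iff.mpr hk
      omega
    · exfalso
      have h3 := (List.all_eq_true.mp h2) dct hdct
      rw [contains_ofList_any] at hc
      simp [hc] at h3
  unfold Spec_extract_positions_and_task_values_py
  unfold extract_positions_and_task_values_py extract_positions_and_task_values_py_alt
  simp only [fold_eq all_keys (PySem.Dict.ofList lens_dict) dicts HD]
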